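-- pv_equiv track=rewrite | github.com/RISE-RoInSpace/OrbFIX-Testbench | src/orbfix/cmds/x0015_signal_usage.py | parse_bitfield
-- ===== SOURCE A (Python) =====
-- def parse_bitfield(bitfield, sat_const_ranges):
--     enabled_sats = {}
--
--     for const, (start, end) in sat_const_ranges.items():
--         sats = []
--         for i in range(start, end + 1):
--             if (bitfield >> i) & 1:
--                 enabled_sat_num = i - start + 1
--                 sats.append(enabled_sat_num)
--         enabled_sats[const] = sats
--
--     return enabled_sats
-- ===== SOURCE B (Python) =====
-- def parse_bitfield(bitfield, sat_const_ranges):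
--     enabled_sats = {}
--     for const, (start, end) in sat_const_ranges.items():
--         width = end - start + 1
--         sats = []
--         if width > 0:
--             masked = (bitfield >> start) % (1 << width)
--             while masked:
--                 pos = masked.bit_length() - 1
--                 sats.append(pos + 1)
--                 masked -= 1 << pos
--             sats.reverse()
--         enabled_sats[const] = sats
--     return enabled_sats
-- ===== Notes on version B (the rewrite author's own statement) =====
-- stated objective: alternative
-- what changed: Instead of scanning every bit position in range(start, end+1) and testing (bitfield >> i) & 1, B extracts the window once as (bitfield >> start) % (1 << width) and then walks only the SET bits, repeatedly taking the top one via bit_length() and subtracting it, reversing the collected list at the end.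
import Mathlib
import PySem

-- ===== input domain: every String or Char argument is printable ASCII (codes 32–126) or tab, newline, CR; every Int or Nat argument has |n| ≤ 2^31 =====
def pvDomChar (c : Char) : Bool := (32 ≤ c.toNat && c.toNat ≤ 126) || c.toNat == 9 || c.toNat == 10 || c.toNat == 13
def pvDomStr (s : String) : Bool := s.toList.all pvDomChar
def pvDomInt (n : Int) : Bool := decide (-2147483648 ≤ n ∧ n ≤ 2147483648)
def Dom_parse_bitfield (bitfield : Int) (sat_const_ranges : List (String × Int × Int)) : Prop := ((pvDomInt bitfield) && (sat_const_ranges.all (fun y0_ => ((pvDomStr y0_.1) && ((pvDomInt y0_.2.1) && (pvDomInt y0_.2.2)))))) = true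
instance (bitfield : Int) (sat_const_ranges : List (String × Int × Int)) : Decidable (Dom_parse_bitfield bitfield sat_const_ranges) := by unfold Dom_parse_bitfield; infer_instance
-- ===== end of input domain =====

-- B walks only the set bits of each constellation's bit window (top bit via bit_length, then subtract)
-- instead of A's scan over every position of range(start, end+1); equivalence is about the return value.

-- ===== PORT A =====
-- Python's 'a >> n' is Lean's 'a >>> n' (arithmetic shift, exact also for negative a); pvShr pins the
-- Nat-shift instance. i ≥ 0 on every executed iteration under Pre_, so 'i.toNat' is exact there.
def pvShr (a : Int) (n : Nat) : Int := a >>> n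

def parse_bitfield (bitfield : Int) (sat_const_ranges : List (String × Int × Int)) : List (String × List Int) :=
  (sat_const_ranges.foldl
    (fun enabled_sats p =>
      enabled_sats.insert p.1
        ((PySem.List.pyRange p.2.1 (p.2.2 + 1) 1).foldl
          (fun sats i =>
            if PySem.Int.band (pvShr bitfield i.toNat) 1 != 0 then sats ++ [i - p.2.1 + 1] else sats)
          []))
    PySem.Dict.empty).items

-- ===== PORT B =====
-- the 'while masked:' loop of Source B; masked ≥ 0 on every call (it is x % 2^width), so 'masked ≤ 0'
-- is Python's exit test 'masked == 0' there; pos = masked.bit_length() - 1, masked -= 1 << pos.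
def pvPeel (masked : Int) (sats : List Int) : List Int :=
  if _h : masked ≤ 0 then sats
  else
    pvPeel (masked - ((1 <<< (PySem.Int.bitLength masked - 1) : Nat) : Int))
      (sats ++ [((PySem.Int.bitLength masked - 1 : Nat) : Int) + 1])
termination_by masked.toNat
decreasing_by
  have h1 : 2 ^ (PySem.Int.bitLength masked - 1) ≤ masked.natAbs :=
    PySem.Int.two_pow_bitLength_le masked (by omega)
  have h2 : 0 < 2 ^ (PySem.Int.bitLength masked - 1) := by positivity
  have hsl : (1 <<< (PySem.Int.bitLength masked - 1) : Nat) = 2 ^ (PySem.Int.bitLength masked - 1) := by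
    simp [Nat.shiftLeft_eq]
  rw [hsl]
  generalize (2 : ℕ) ^ (PySem.Int.bitLength masked - 1) = c at h1 h2
  omega

-- '>>' is pvShr as in A; '%'/'<<' are PySem.Int.mod and Nat '<<<' (the modulus 1 << width is positive);
-- start ≥ 0 whenever the window is nonempty under Pre_, so 'start.toNat' is exact there.
def parse_bitfield_alt (bitfield : Int) (sat_const_ranges : List (String × Int × Int)) : List (String × List Int) :=
  (sat_const_ranges.foldl
    (fun enabled_sats p =>
      let width : Int := p.2.2 - p.2.1 + 1
      enabled_sats.insert p.1
        (if 0 < width then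
          (pvPeel (PySem.Int.mod (pvShr bitfield p.2.1.toNat) ((1 <<< width.toNat : Nat) : Int)) []).reverse
        else []))
    PySem.Dict.empty).items

-- ===== PRECONDITION & SPEC =====
-- Pre_ excludes exactly the inputs where Python A raises: a constellation with a nonempty
-- window (start ≤ end) but negative start makes 'bitfield >> start' raise ValueError.
def Pre_parse_bitfield (bitfield : Int) (sat_const_ranges : List (String × Int × Int)) : Prop :=
  ∀ p ∈ sat_const_ranges, p.2.1 ≤ p.2.2 → 0 ≤ p.2.1
instance (bitfield : Int) (sat_const_ranges : List (String × Int × Int)) : Decidable (Pre_parse_bitfield bitfield sat_const_ranges) := by unfold Pre_parse_bitfield; infer_instance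
def pvWitness_parse_bitfield : Int × (List (String × Int × Int)) := (21, [("GPS", 0, 3), ("GAL", 5, 4)])

def Spec_parse_bitfield (bitfield : Int) (sat_const_ranges : List (String × Int × Int)) (out : List (String × List Int)) : Prop := out = parse_bitfield_alt bitfield sat_const_ranges
instance (bitfield : Int) (sat_const_ranges : List (String × Int × Int)) (out : List (String × List Int)) : Decidable (Spec_parse_bitfield bitfield sat_const_ranges out) := by unfold Spec_parse_bitfield; infer_instance

-- ===== CLAIM (what is proved, stated in full; the proofs are below) =====
def Claim_equal_parse_bitfield : Prop := ∀ (bitfield : Int) (sat_const_ranges : List (String × Int × Int)), Dom_parse_bitfield bitfield sat_const_ranges → Pre_parse_bitfield bitfield sat_const_ranges → Spec_parse_bitfield bitfield sat_const_ranges (parse_bitfield bitfield sat_const_ranges)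

-- ===== LEMMAS AND PROOFS =====

-- the enabled satellite numbers of a width-w window whose bits are the Nat m
def pvBits (m : Nat) (w : Nat) : List Int :=
  ((List.range w).filter (fun j => m / 2 ^ j % 2 == 1)).map (fun (j : Nat) => ((j : Int) + 1))

lemma pvBits_zero (w : Nat) : pvBits 0 w = [] := by
  unfold pvBits
  simp

-- clearing the top set bit removes the last element of pvBits
lemma pvBits_split (x t w : Nat) (hx : x < 2 ^ t) (ht : t < w) :
    pvBits (x + 2 ^ t) w = pvBits x w ++ [(t : Int) + 1] := by
  have hupper : ∀ m : Nat, m < 2 ^ (t + 1) → ∀ j, t + 1 ≤ j → (m / 2 ^ j % 2 == 1) = false := by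
    intro m hm j hj
    have : m < 2 ^ j := lt_of_lt_of_le hm (Nat.pow_le_pow_right (by norm_num) hj)
    simp [Nat.div_eq_of_lt this]
  have hsum : x + 2 ^ t < 2 ^ (t + 1) := by
    have : (2:Nat) ^ (t+1) = 2 ^ t + 2 ^ t := by ring
    omega
  have hxlt : x < 2 ^ (t + 1) :=
    lt_of_lt_of_le hx (Nat.pow_le_pow_right (by norm_num) (by omega))
  have hr : List.range w = List.range (t + 1) ++ (List.range (w - (t + 1))).map (fun j => (t + 1) + j) := by
    conv_lhs => rw [show w = (t + 1) + (w - (t + 1)) by omega]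
    exact List.range_add
  have htopm : ((x + 2 ^ t) / 2 ^ t % 2 == 1) = true := by
    have hdiv : (x + 2 ^ t) / 2 ^ t = x / 2 ^ t + 1 := by
      have := Nat.add_mul_div_left x 1 (show 0 < 2 ^ t by positivity)
      simpa using this
    rw [hdiv, Nat.div_eq_of_lt hx]
    decide
  have htopx : (x / 2 ^ t % 2 == 1) = false := by
    rw [Nat.div_eq_of_lt hx]
    decide
  have e1 : ((List.range (w - (t + 1))).map (fun j => (t + 1) + j)).filter (fun j => (x + 2 ^ t) / 2 ^ j % 2 == 1) = [] := by
    rw [List.filter_eq_nil_iff]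
    intro a ha
    simp only [List.mem_map, List.mem_range] at ha
    obtain ⟨j, hj, rfl⟩ := ha
    have := hupper (x + 2 ^ t) hsum (t + 1 + j) (by omega)
    simpa using this
  have e2 : ((List.range (w - (t + 1))).map (fun j => (t + 1) + j)).filter (fun j => x / 2 ^ j % 2 == 1) = [] := by
    rw [List.filter_eq_nil_iff]
    intro a ha
    simp only [List.mem_map, List.mem_range] at ha
    obtain ⟨j, hj, rfl⟩ := ha
    have := hupper x hxlt (t + 1 + j) (by omega)
    simpa using this
  have e3 : (List.range t).filter (fun j => (x + 2 ^ t) / 2 ^ j % 2 == 1)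
      = (List.range t).filter (fun j => x / 2 ^ j % 2 == 1) := by
    apply List.filter_congr
    intro j hjmem
    have hj := List.mem_range.mp hjmem
    have hp : (2:Nat) ^ t = 2 ^ j * 2 ^ (t - j) := by rw [← pow_add]; congr 1; omega
    have hdiv : (x + 2 ^ t) / 2 ^ j = x / 2 ^ j + 2 ^ (t - j) := by
      rw [hp, Nat.add_mul_div_left x _ (by positivity)]
    have hev : (2:Nat) ^ (t - j) = 2 * 2 ^ (t - j - 1) := by
      rw [← pow_succ']; congr 1; omega
    have hmm : (x + 2 ^ t) / 2 ^ j % 2 = x / 2 ^ j % 2 := by rw [hdiv, hev]; omega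
    rw [hmm]
  have hfilters : (List.range w).filter (fun j => (x + 2 ^ t) / 2 ^ j % 2 == 1)
      = (List.range w).filter (fun j => x / 2 ^ j % 2 == 1) ++ [t] := by
    rw [hr, List.filter_append, List.filter_append, List.range_succ,
        List.filter_append, List.filter_append, e1, e2, e3]
    simp [htopm, htopx]
  unfold pvBits
  rw [hfilters]
  simp

lemma pvPeel_spec (w : Nat) : ∀ m : Nat, m < 2 ^ w → ∀ acc : List Int,
    pvPeel (m : Int) acc = acc ++ (pvBits m w).reverse := by
  intro m
  induction m using Nat.strong_induction_on with
  | _ m ih =>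
    intro hm acc
    by_cases hm0 : m = 0
    · subst hm0
      rw [pvPeel.eq_def]
      simp [pvBits_zero]
    · have hmpos : 0 < m := Nat.pos_of_ne_zero hm0
      rw [pvPeel.eq_def]
      rw [dif_neg (by omega)]
      set t := PySem.Int.bitLength (m : Int) - 1 with htdef
      have hble : 2 ^ t ≤ m := by
        have := PySem.Int.two_pow_bitLength_le (m : Int) (by exact_mod_cast hm0)
        simpa using this
      have hbl1 : 1 ≤ PySem.Int.bitLength (m : Int) := by
        by_contra h
        have h0 : PySem.Int.bitLength (m : Int) = 0 := by omega
        have hlt := PySem.Int.lt_two_pow_bitLength (m : Int)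
        rw [h0] at hlt
        simp at hlt
        omega
      have hblt : m < 2 ^ (t + 1) := by
        have hlt := PySem.Int.lt_two_pow_bitLength (m : Int)
        have ht1 : t + 1 = PySem.Int.bitLength (m : Int) := by omega
        rw [ht1]
        simpa using hlt
      have htw : t < w := by
        have h2 : (2:Nat) ^ t < 2 ^ w := lt_of_le_of_lt hble hm
        exact (Nat.pow_lt_pow_iff_right (by norm_num)).mp h2
      have hsl : (1 <<< t : Nat) = 2 ^ t := by simp [Nat.shiftLeft_eq]
      have hcast : (m : Int) - ((1 <<< t : Nat) : Int) = ((m - 2 ^ t : Nat) : Int) := by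
        rw [hsl, Nat.cast_sub hble]
      rw [hcast]
      have hm'lt : m - 2 ^ t < m := by
        have : (0:Nat) < 2 ^ t := by positivity
        omega
      rw [ih (m - 2 ^ t) hm'lt (lt_of_le_of_lt (Nat.sub_le m _) hm) (acc ++ [((t : Nat) : Int) + 1])]
      have hx : m - 2 ^ t < 2 ^ t := by
        have : (2:Nat) ^ (t+1) = 2 ^ t + 2 ^ t := by ring
        omega
      have hsplit : pvBits m w = pvBits (m - 2 ^ t) w ++ [(t : Int) + 1] := by
        have hmeq : m = (m - 2 ^ t) + 2 ^ t := by omega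
        conv_lhs => rw [hmeq]
        exact pvBits_split (m - 2 ^ t) t w hx htw
      rw [hsplit]
      simp

-- Python's '(bitfield >> i) & 1' at position i = s + k equals bit k of the extracted window
lemma pvCondBridge (bf s : Int) (hs : 0 ≤ s) (w k : Nat) (hk : k < w) :
    (PySem.Int.band (pvShr bf (s + (k : Int)).toNat) 1 != 0)
      = ((PySem.Int.mod (pvShr bf s.toNat) (2 ^ w)).toNat / 2 ^ k % 2 == 1) := by
  have hidx : (s + (k : Int)).toNat = s.toNat + k := by omega
  have h2w : (0:Int) < 2 ^ w := by positivity
  unfold pvShr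
  rw [hidx, PySem.Int.band_one, PySem.Int.mod_eq_emod_of_pos (by norm_num : (0:Int) < 2),
      Int.shiftRight_add, PySem.Int.mod_eq_emod_of_pos h2w]
  set x := bf >>> s.toNat with hxdef
  set r := x % 2 ^ w with hrdef
  set q := x / 2 ^ w with hqdef
  have hr0 : 0 ≤ r := Int.emod_nonneg x (by positivity)
  have hrlt : r < 2 ^ w := Int.emod_lt_of_pos x h2w
  have hsr : x >>> k = x / (2 ^ k : Int) := by
    rw [Int.shiftRight_eq_div_pow]
    norm_num
  have hpow : (2:Int) ^ w = 2 ^ k * 2 ^ (w - k) := by rw [← pow_add]; congr 1; omega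
  have h := Int.mul_ediv_add_emod x (2 ^ w)
  rw [← hqdef, ← hrdef] at h
  have hdecomp : x = r + 2 ^ k * (2 ^ (w - k) * q) := by
    linear_combination -h + q * hpow
  have hq : x / (2 ^ k : Int) = r / 2 ^ k + 2 ^ (w - k) * q := by
    conv_lhs => rw [hdecomp]
    exact Int.add_mul_ediv_left r _ (by positivity : (2:Int) ^ k ≠ 0)
  have hw1 : (2:Int) ^ (w - k) = 2 * 2 ^ (w - k - 1) := by
    rw [← pow_succ']; congr 1; omega
  have hmod : (x >>> k) % 2 = r / 2 ^ k % 2 := by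
    rw [hsr, hq, hw1, mul_assoc]
    exact Int.add_mul_emod_self_left (r / 2 ^ k) 2 (2 ^ (w - k - 1) * q)
  have hcast : r / 2 ^ k % 2 = ((r.toNat / 2 ^ k % 2 : Nat) : Int) := by
    rw [show r = ((r.toNat : Nat) : Int) by omega]
    norm_cast
  rw [hmod, hcast]
  rcases Nat.mod_two_eq_zero_or_one (r.toNat / 2 ^ k) with hpar | hpar <;> rw [hpar] <;> decide

-- A's inner range scan computes the bits of the window
lemma pvInnerA (bf s e : Int) (hs : 0 ≤ s) (hse : s ≤ e) :
    (PySem.List.pyRange s (e + 1) 1).foldl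
      (fun sats i => if PySem.Int.band (pvShr bf i.toNat) 1 != 0 then sats ++ [i - s + 1] else sats) []
    = pvBits ((PySem.Int.mod (pvShr bf s.toNat) (2 ^ (e - s + 1).toNat)).toNat) (e - s + 1).toNat := by
  rw [PySem.List.foldl_append_if]
  rw [PySem.List.pyRange_one]
  have hw : (e + 1 - s).toNat = (e - s + 1).toNat := by omega
  rw [hw]
  set w := (e - s + 1).toNat with hwdef
  set m := (PySem.Int.mod (pvShr bf s.toNat) (2 ^ w)).toNat with hmdef
  rw [List.filter_map, List.map_map]
  unfold pvBits
  have hfil : (List.range w).filter ((fun i => PySem.Int.band (pvShr bf i.toNat) 1 != 0) ∘ (fun k : Nat => s + (k : Int)))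
      = (List.range w).filter (fun j => m / 2 ^ j % 2 == 1) := by
    apply List.filter_congr
    intro k hk
    simp only [Function.comp_apply]
    exact pvCondBridge bf s hs w k (List.mem_range.mp hk)
  rw [hfil]
  apply List.map_congr_left
  intro k _
  simp only [Function.comp_apply]
  ring

-- B's set-bit walk computes the bits of the window
lemma pvInnerB (bf s e : Int) (_hs : 0 ≤ s) (_hse : s ≤ e) :
    (pvPeel (PySem.Int.mod (pvShr bf s.toNat) ((1 <<< (e - s + 1).toNat : Nat) : Int)) []).reverse
    = pvBits ((PySem.Int.mod (pvShr bf s.toNat) (2 ^ (e - s + 1).toNat)).toNat) (e - s + 1).toNat := by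
  set w := (e - s + 1).toNat with hwdef
  have hsl : ((1 <<< w : Nat) : Int) = 2 ^ w := by
    rw [Nat.shiftLeft_eq, one_mul]
    push_cast
    ring
  rw [hsl]
  set md := PySem.Int.mod (pvShr bf s.toNat) (2 ^ w) with hmd
  have h2w : (0:Int) < 2 ^ w := by positivity
  have h0 : 0 ≤ md := PySem.Int.mod_nonneg _ h2w
  have hlt : md < 2 ^ w := PySem.Int.mod_lt _ h2w
  have hcw : ((2 ^ w : Nat) : Int) = 2 ^ w := by push_cast; ring
  have hmlt : md.toNat < 2 ^ w := by omega
  have hspec := pvPeel_spec w md.toNat hmlt []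
  rw [show ((md.toNat : Nat) : Int) = md by omega] at hspec
  rw [hspec]
  simp

-- the two dict-building folds agree entry by entry
lemma pvOuter (bf : Int) : ∀ (rs : List (String × Int × Int)) (d : PySem.Dict String (List Int)),
    (∀ p ∈ rs, p.2.1 ≤ p.2.2 → 0 ≤ p.2.1) →
    rs.foldl
      (fun enabled_sats p =>
        enabled_sats.insert p.1
          ((PySem.List.pyRange p.2.1 (p.2.2 + 1) 1).foldl
            (fun sats i =>
              if PySem.Int.band (pvShr bf i.toNat) 1 != 0 then sats ++ [i - p.2.1 + 1] else sats)
            [])) d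
    = rs.foldl
      (fun enabled_sats p =>
        let width : Int := p.2.2 - p.2.1 + 1
        enabled_sats.insert p.1
          (if 0 < width then
            (pvPeel (PySem.Int.mod (pvShr bf p.2.1.toNat) ((1 <<< width.toNat : Nat) : Int)) []).reverse
          else [])) d := by
  intro rs
  induction rs with
  | nil => intro d _; rfl
  | cons p rest ih =>
    intro d hpre
    simp only [List.foldl_cons]
    have hstep :
        ((PySem.List.pyRange p.2.1 (p.2.2 + 1) 1).foldl
          (fun sats i =>
            if PySem.Int.band (pvShr bf i.toNat) 1 != 0 then sats ++ [i - p.2.1 + 1] else sats)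
          [])
        = (if 0 < p.2.2 - p.2.1 + 1 then
            (pvPeel (PySem.Int.mod (pvShr bf p.2.1.toNat) ((1 <<< (p.2.2 - p.2.1 + 1).toNat : Nat) : Int)) []).reverse
          else []) := by
      by_cases hse : p.2.1 ≤ p.2.2
      · have hs : 0 ≤ p.2.1 := hpre p (List.mem_cons_self) hse
        rw [if_pos (by omega), pvInnerA bf p.2.1 p.2.2 hs hse, pvInnerB bf p.2.1 p.2.2 hs hse]
      · rw [if_neg (by omega), PySem.List.pyRange_one_eq_nil (by omega)]
        rfl
    rw [hstep]
    exact ih _ (fun q hq => hpre q (List.mem_cons_of_mem _ hq))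

-- ===== VERDICT (by name: the statement is the Claim_ definition above) =====
theorem parse_bitfield_spec : Claim_equal_parse_bitfield := by
  unfold Claim_equal_parse_bitfield
  intro bf rs _hdom hpre
  unfold Spec_parse_bitfield parse_bitfield parse_bitfield_alt
  exact congrArg PySem.Dict.items (pvOuter bf rs PySem.Dict.empty hpre)
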